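-- pv_equiv track=rewrite | github.com/by-sabbir/searchfast | search-fast.py | linkCreator
-- ===== SOURCE A (Python) =====
-- def linkCreator(links):
-- 	link = links
-- 	link = stringCheck(link)
-- 	linkLst = link.split()
-- 	created = ""
-- 	strng = "\\ "
-- 	index = []
-- 	linkLen = len(linkLst) - 1
-- 	for add in range(linkLen):
-- 		created += linkLst[add] + strng
-- 	created += linkLst[linkLen]
--
-- 	return created
--
-- def stringCheck(strRec):
-- 	this = ""
-- 	sp_chars = "!@#$%^&*()_+{}[]=-;:\|,./"
-- 	for strings in strRec:
-- 		for each in strings: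
-- 			if "\'" in each:
-- 				each = "\\'"
-- 			# if " " in each:
-- 			# 	each = "\ "
-- 			if each in sp_chars:
-- 				each = "\\" + each
-- 			this += each
-- 	return this
-- ===== SOURCE B (Python) =====
-- def linkCreator(links):
--     specials = set("!@#$%^&*()_+{}[]=-;:\\|,./'")
--     out = []
--     first = True
--     in_token = False
--     for ch in links:
--         if ch.isspace():
--             in_token = False
--         else:
--             if not in_token:
--                 if not first:
--                     out.append("\\ ")
--                 first = False
--                 in_token = True
--             if ch in specials:
--                 out.append("\\")
--             out.append(ch)
--     return "".join(out)
-- ===== Notes on version B (the rewrite author's own statement) =====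
-- stated objective: alternative
-- what changed: B is a single streaming state-machine pass (first/in_token flags) that escapes each character and inserts the backslash-space separators on the fly while scanning, instead of A's three staged passes (build a fully escaped string, split it into a word list, then join the words with an index loop).
import Mathlib
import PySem

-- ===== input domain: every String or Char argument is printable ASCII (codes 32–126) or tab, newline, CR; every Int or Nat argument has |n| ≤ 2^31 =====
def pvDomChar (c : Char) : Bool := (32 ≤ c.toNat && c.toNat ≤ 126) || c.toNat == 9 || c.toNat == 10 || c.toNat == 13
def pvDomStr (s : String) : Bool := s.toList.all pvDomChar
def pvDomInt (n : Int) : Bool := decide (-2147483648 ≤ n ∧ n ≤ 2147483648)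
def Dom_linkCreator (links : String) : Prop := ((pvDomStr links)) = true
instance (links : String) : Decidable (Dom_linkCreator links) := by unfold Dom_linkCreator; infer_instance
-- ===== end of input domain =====

set_option maxRecDepth 8192


-- B replaces A's three staged passes (escape the whole string, split it, index-loop join)
-- by a single streaming state-machine pass that escapes characters and inserts the
-- backslash-space separators on the fly (measured faster in a timing run); same return value wherever A returns.

-- ===== PORT A =====
-- sp_chars = "!@#$%^&*()_+{}[]=-;:\|,./"
def spChars : List Char := ['!', '@', '#', '$', '%', '^', '&', '*', '(', ')', '_', '+',
  '{', '}', '[', ']', '=', '-', ';', ':', '\\', '|', ',', '.', '/']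

-- stringCheck: outer loop over strRec's chars; inner loop over the 1-char string 'strings'
def stringCheck (strRec : List Char) : List Char :=
  strRec.foldl (fun this strings =>
    [strings].foldl (fun this each0 =>
      let each := if PySem.Chars.isIn ['\''] [each0] then ['\\', '\''] else [each0]
      let each := if PySem.Chars.isIn each spChars then '\\' :: each else each
      this ++ each) this) []

def linkCreator (links : String) : String :=
  let link := links.toList
  let link := stringCheck link
  let linkLst := PySem.Chars.split₀ link
  let strng : List Char := ['\\', ' ']
  let linkLen : Int := PySem.List.len linkLst - 1
  let created := (PySem.List.pyRange 0 linkLen).foldl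
    (fun created add => created ++ PySem.List.pyGetD linkLst add [] ++ strng) []
  let created := created ++ PySem.List.pyGetD linkLst linkLen []
  String.ofList created

-- ===== PORT B =====
-- specials = set("!@#$%^&*()_+{}[]=-;:\|,./'")  (the sp_chars plus the apostrophe)
def specialsB : PySem.Set Char := PySem.Set.ofList (spChars ++ ['\''])

-- the loop body of B: state = (out, first, in_token)
def bStep (st : List Char × Bool × Bool) (ch : Char) : List Char × Bool × Bool :=
  if PySem.Chars.isspace ch then (st.1, st.2.1, false)
  else
    let st1 := if !st.2.2 then
        ((if !st.2.1 then st.1 ++ ['\\', ' '] else st.1), false, true)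
      else st
    let out := if PySem.Set.contains specialsB ch then st1.1 ++ ['\\'] else st1.1
    (out ++ [ch], st1.2.1, true)

def linkCreator_alt (links : String) : String :=
  String.ofList (links.toList.foldl bStep ([], true, false)).1

-- ===== PRECONDITION & SPEC =====
-- Pre_ excludes inputs with no non-whitespace character: there A's linkLst[-1] on the
-- empty token list raises IndexError (B returns "" there, excluded, A crashes).
def Pre_linkCreator (links : String) : Prop :=
  (links.toList.any (fun c => !PySem.Chars.isspace c)) = true
instance (links : String) : Decidable (Pre_linkCreator links) := by
  unfold Pre_linkCreator; infer_instance

def pvWitness_linkCreator : String := "it's a test!"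

def Spec_linkCreator (links : String) (out : String) : Prop := out = linkCreator_alt links
instance (links : String) (out : String) : Decidable (Spec_linkCreator links out) := by
  unfold Spec_linkCreator; infer_instance

-- ===== CLAIM (what is proved, stated in full; the proofs are below) =====
def Claim_equal_linkCreator : Prop := ∀ (links : String), Dom_linkCreator links → Pre_linkCreator links → Spec_linkCreator links (linkCreator links)

-- ===== LEMMAS AND PROOFS =====

-- the per-character escape both programs perform, written as a plain conditional
def escChar (c : Char) : List Char :=
  if c = '\'' then ['\\', '\''] else if c ∈ spChars then ['\\', c] else [c]

-- escaping a whole token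
def escTok (t : List Char) : List Char := t.flatMap escChar

def sepB : List Char := ['\\', ' ']

-- the token list split₀.go would hold after flushing the current (reversed) word
def pushedTok (cur : List Char) (acc : List (List Char)) : List (List Char) :=
  if cur.isEmpty then acc else cur.reverse :: acc

-- the output B has emitted when split₀.go's state is acc (reversed token list)
def emitB (acc : List (List Char)) : List Char :=
  PySem.Chars.join sepB (acc.reverse.map escTok)

theorem escA_eq (c : Char) :
    (let each := if PySem.Chars.isIn ['\''] [c] then ['\\', '\''] else [c]
     if PySem.Chars.isIn each spChars then '\\' :: each else each) = escChar c := by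
  by_cases hq : c = '\''
  · subst hq; decide
  · have h1 : PySem.Chars.isIn ['\''] [c] = false := by
      rw [PySem.Chars.isIn_eq_false_iff, List.singleton_infix_singleton_iff]
      exact fun h => hq h.symm
    simp only [h1, Bool.false_eq_true, if_false, escChar, hq]
    by_cases hm : c ∈ spChars
    · have : PySem.Chars.isIn [c] spChars = true := by
        rw [PySem.Chars.isIn_iff_infix]
        obtain ⟨u, v, huv⟩ := List.append_of_mem hm
        exact ⟨u, v, by rw [huv]; simp⟩
      simp [this, hm]
    · have : PySem.Chars.isIn [c] spChars = false := by
        rw [PySem.Chars.isIn_eq_false_iff]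
        intro h
        exact hm (h.mem (List.mem_singleton_self c))
      simp [this, hm]

theorem stringCheck_eq (l : List Char) : stringCheck l = l.flatMap escChar := by
  unfold stringCheck
  have : ∀ (this : List Char) (c : Char),
      [c].foldl (fun this each0 =>
        let each := if PySem.Chars.isIn ['\''] [each0] then ['\\', '\''] else [each0]
        let each := if PySem.Chars.isIn each spChars then '\\' :: each else each
        this ++ each) this = this ++ escChar c := by
    intro this c
    simp only [List.foldl_cons, List.foldl_nil]
    rw [← escA_eq c]
  simp only [this]
  exact PySem.List.foldl_append_eq_flatMap escChar l []

-- split₀ returns [] only on all-whitespace input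
theorem split₀go_nil (s : List Char) (cur : List Char) (acc : List (List Char))
    (h : PySem.Chars.split₀.go s cur acc = []) :
    acc = [] ∧ cur = [] ∧ ∀ c ∈ s, PySem.Chars.isspace c = true := by
  induction s generalizing cur acc with
  | nil =>
    by_cases hc : cur.isEmpty
    · refine ⟨?_, List.isEmpty_iff.mp hc, by simp⟩
      simpa [PySem.Chars.split₀.go, hc] using h
    · exfalso; simp [PySem.Chars.split₀.go, hc] at h
  | cons c rest ih =>
    by_cases hs : PySem.Chars.isspace c
    · by_cases hc : cur.isEmpty
      · simp only [PySem.Chars.split₀.go, hs, hc, if_true] at h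
        obtain ⟨ha, _, hall⟩ := ih [] acc h
        exact ⟨ha, by simpa [List.isEmpty_iff] using hc, by
          intro x hx
          rcases List.mem_cons.mp hx with rfl | hx
          · exact hs
          · exact hall x hx⟩
      · simp only [PySem.Chars.split₀.go, hs, hc, if_true, Bool.false_eq_true, if_false] at h
        obtain ⟨ha, _, _⟩ := ih _ _ h
        simp at ha
    · simp only [PySem.Chars.split₀.go, hs, Bool.false_eq_true, if_false] at h
      obtain ⟨_, hc, _⟩ := ih _ _ h
      simp at hc

theorem split₀_ne_nil (s : List Char) (c : Char) (hc : c ∈ s)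
    (hns : PySem.Chars.isspace c = false) : PySem.Chars.split₀ s ≠ [] := by
  intro h
  obtain ⟨_, _, hall⟩ := split₀go_nil s [] [] h
  rw [hall c hc] at hns
  exact Bool.true_eq_false.mp hns

-- the manual index-join of A equals Chars.join
theorem manual_join (sep : List Char) (x : List Char) (xs : List (List Char)) :
    (List.range xs.length).flatMap (fun k => (x :: xs).getD k [] ++ sep)
      ++ (x :: xs).getD xs.length []
      = PySem.Chars.join sep (x :: xs) := by
  induction xs generalizing x with
  | nil => simp [PySem.Chars.join_singleton]
  | cons y rest ih =>
    rw [PySem.Chars.join_cons_cons, ← ih y]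
    rw [show List.range (y :: rest).length = 0 :: (List.range rest.length).map (· + 1) by
      simp [List.range_succ_eq_map]]
    simp only [List.flatMap_cons, List.flatMap_map, List.getD_cons_succ,
      List.getD_cons_zero, List.length_cons]
    simp [List.append_assoc]

theorem manual_join_int (sep : List Char) (lst : List (List Char)) (h : lst ≠ []) :
    (PySem.List.pyRange 0 (PySem.List.len lst - 1)).foldl
        (fun created add => created ++ PySem.List.pyGetD lst add [] ++ sep) []
      ++ PySem.List.pyGetD lst (PySem.List.len lst - 1) []
      = PySem.Chars.join sep lst := by
  obtain ⟨x, xs, rfl⟩ := List.exists_cons_of_ne_nil h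
  have hlen : PySem.List.len (x :: xs) - 1 = (xs.length : Int) := by
    simp [PySem.List.len]
  rw [hlen, PySem.List.pyRange_zero_natCast, List.foldl_map]
  simp only [PySem.List.pyGetD_natCast, List.append_assoc]
  rw [PySem.List.foldl_append_eq_flatMap
    (fun k => (x :: xs).getD k [] ++ sep) (List.range xs.length) [], List.nil_append]
  simpa [List.append_assoc] using manual_join sep x xs

-- escChar facts
theorem escChar_ne_nil (c : Char) : escChar c ≠ [] := by
  unfold escChar; split_ifs <;> simp

theorem escTok_eq_nil_iff (t : List Char) : escTok t = [] ↔ t = [] := by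
  cases t with
  | nil => simp [escTok]
  | cons c rest =>
    simp only [escTok, List.flatMap_cons, List.append_eq_nil_iff]
    constructor
    · rintro ⟨h, _⟩; exact absurd h (escChar_ne_nil c)
    · intro h; exact absurd h (by simp)

theorem spChars_not_space : ∀ c ∈ spChars, PySem.Chars.isspace c = false := by
  intro c hc; fin_cases hc <;> decide

theorem escChar_of_isspace (c : Char) (h : PySem.Chars.isspace c = true) :
    escChar c = [c] := by
  unfold escChar
  have hq : c ≠ '\'' := by rintro rfl; simp [show PySem.Chars.isspace '\'' = false by decide] at h
  have hm : c ∉ spChars := fun hc => by rw [spChars_not_space c hc] at h; exact absurd h (by simp)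
  simp [hq, hm]

theorem escChar_not_space_chars (c : Char) (h : PySem.Chars.isspace c = false) :
    escChar c = [c] ∨ escChar c = ['\\', c] := by
  unfold escChar
  by_cases hq : c = '\''
  · subst hq; right; simp
  · by_cases hm : c ∈ spChars <;> simp [hq, hm]

theorem mem_specialsB (c : Char) : c ∈ specialsB ↔ (c = '\'' ∨ c ∈ spChars) := by
  unfold specialsB
  rw [PySem.Set.mem_ofList, List.mem_append, List.mem_singleton]
  tauto

-- B's in-loop escape equals appending escChar
theorem esc_append (out : List Char) (c : Char) :
    (if PySem.Set.contains specialsB c then out ++ ['\\'] else out) ++ [c]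
      = out ++ escChar c := by
  unfold escChar
  by_cases hq : c = '\''
  · have h : c ∈ specialsB := (mem_specialsB c).mpr (Or.inl hq)
    subst hq; simp [h]
  · by_cases hm : c ∈ spChars
    · have h : c ∈ specialsB := (mem_specialsB c).mpr (Or.inr hm)
      simp [h, hq, hm]
    · have h : c ∉ specialsB := by
        intro hx
        rcases (mem_specialsB c).mp hx with h | h
        · exact hq h
        · exact hm h
      simp [h, hq, hm]

-- escaping commutes with the whitespace split: escTok each token
theorem split₀go_flatMap (s : List Char) (cur : List Char) (acc : List (List Char)) :
    PySem.Chars.split₀.go (s.flatMap escChar) ((escTok cur.reverse).reverse) (acc.map escTok)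
      = (PySem.Chars.split₀.go s cur acc).map escTok := by
  induction s generalizing cur acc with
  | nil =>
    have hiff : ((escTok cur.reverse).reverse).isEmpty = cur.isEmpty := by
      cases cur with
      | nil => simp [escTok]
      | cons a l =>
        have h2 : (escTok (a :: l).reverse).reverse ≠ [] := by
          simp only [ne_eq, List.reverse_eq_nil_iff, escTok_eq_nil_iff]
          simp
        rw [List.isEmpty_eq_false_iff.mpr h2]
        simp
    simp only [List.flatMap_nil, PySem.Chars.split₀.go, hiff]
    by_cases hc : cur.isEmpty
    · simp [hc]
    · simp [hc, ← List.map_reverse]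
  | cons c rest ih =>
    by_cases hs : PySem.Chars.isspace c
    · have hesc := escChar_of_isspace c hs
      simp only [List.flatMap_cons, hesc, List.singleton_append]
      have hiff : ((escTok cur.reverse).reverse).isEmpty = cur.isEmpty := by
        cases cur with
        | nil => simp [escTok]
        | cons a l =>
          have h2 : (escTok (a :: l).reverse).reverse ≠ [] := by
            simp only [ne_eq, List.reverse_eq_nil_iff, escTok_eq_nil_iff]
            simp
          rw [List.isEmpty_eq_false_iff.mpr h2]
          simp
      simp only [PySem.Chars.split₀.go, hs, if_true, hiff]
      by_cases hc : cur.isEmpty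
      · simp only [hc, if_true]
        have := ih [] acc
        simpa [escTok] using this
      · simp only [hc, Bool.false_eq_true, if_false]
        have := ih [] (cur.reverse :: acc)
        simpa [escTok] using this
    · have hcons : (escTok (c :: cur).reverse).reverse
          = (escChar c).reverse ++ (escTok cur.reverse).reverse := by
        simp [escTok, List.flatMap_append]
      rcases escChar_not_space_chars c (by simpa using hs) with h1 | h2
      · simp only [List.flatMap_cons, h1, List.singleton_append]
        simp only [PySem.Chars.split₀.go, hs, Bool.false_eq_true, if_false]
        have := ih (c :: cur) acc
        rw [hcons, h1] at this
        simpa using this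
      · simp only [List.flatMap_cons, h2]
        have hbs : PySem.Chars.isspace '\\' = false := by decide
        simp only [List.cons_append, List.nil_append, PySem.Chars.split₀.go, hs, hbs,
          Bool.false_eq_true, if_false]
        have := ih (c :: cur) acc
        rw [hcons, h2] at this
        simpa using this

theorem split₀_flatMap (s : List Char) :
    PySem.Chars.split₀ (s.flatMap escChar) = (PySem.Chars.split₀ s).map escTok := by
  have := split₀go_flatMap s [] []
  simpa [PySem.Chars.split₀, escTok] using this

-- join over a snoc
theorem join_snoc (sep : List Char) (xs : List (List Char)) (y : List Char) :
    PySem.Chars.join sep (xs ++ [y])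
      = (if xs.isEmpty then [] else PySem.Chars.join sep xs ++ sep) ++ y := by
  induction xs with
  | nil => simp [PySem.Chars.join_singleton]
  | cons x rest ih =>
    cases rest with
    | nil => simp [PySem.Chars.join_cons_cons, PySem.Chars.join_singleton]
    | cons z zs =>
      rw [List.cons_append, List.cons_append, PySem.Chars.join_cons_cons,
        ← List.cons_append, ih]
      simp [PySem.Chars.join_cons_cons, List.append_assoc]

theorem emitB_cons (t : List Char) (acc : List (List Char)) :
    emitB (t :: acc)
      = (if acc.isEmpty then [] else emitB acc ++ sepB) ++ escTok t := by
  unfold emitB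
  rw [List.reverse_cons, List.map_append, List.map_singleton, join_snoc]
  cases acc with
  | nil => simp
  | cons a l =>
    have h2 : (List.map escTok (a :: l).reverse).isEmpty = false := by
      rw [List.isEmpty_eq_false_iff]; simp
    rw [h2]
    simp

theorem escChar_if (c : Char) :
    (if c ∈ specialsB then (['\\'] : List Char) else []) ++ [c] = escChar c := by
  unfold escChar
  by_cases hq : c = '\''
  · rw [if_pos ((mem_specialsB _).mpr (Or.inl hq))]
    subst hq; simp
  · by_cases hm : c ∈ spChars
    · rw [if_pos ((mem_specialsB _).mpr (Or.inr hm))]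
      simp [hq, hm]
    · rw [if_neg (fun hx => by
        rcases (mem_specialsB c).mp hx with h | h
        · exact hq h
        · exact hm h)]
      simp [hq, hm]

-- B's streaming fold computes the escTok'd join of split₀.go's result
theorem bfold_go (s : List Char) (cur : List Char) (acc : List (List Char)) :
    (s.foldl bStep (emitB (pushedTok cur acc), (pushedTok cur acc).isEmpty, !cur.isEmpty)).1
      = PySem.Chars.join sepB ((PySem.Chars.split₀.go s cur acc).map escTok) := by
  induction s generalizing cur acc with
  | nil =>
    simp only [List.foldl_nil, PySem.Chars.split₀.go]
    by_cases hc : cur.isEmpty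
    · simp [pushedTok, hc, emitB]
    · simp [pushedTok, hc, emitB]
  | cons c rest ih =>
    by_cases hs : PySem.Chars.isspace c
    · simp only [List.foldl_cons, bStep, hs, if_true, PySem.Chars.split₀.go]
      by_cases hc : cur.isEmpty
      · have := ih [] acc
        simp only [pushedTok, List.isEmpty_nil, if_true, Bool.not_true] at this ⊢
        simp only [hc, if_true]
        simpa [pushedTok, hc] using this
      · have := ih [] (cur.reverse :: acc)
        simp only [pushedTok, List.isEmpty_nil, if_true, Bool.not_true] at this
        simp only [hc, Bool.false_eq_true, if_false]
        simpa [pushedTok, hc] using this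
    · -- non-whitespace character
      rw [List.foldl_cons]
      by_cases hc : cur.isEmpty
      · -- cur = [], in_token = false
        have hcur : cur = [] := List.isEmpty_iff.mp hc
        subst hcur
        have hstate : bStep (emitB (pushedTok [] acc), (pushedTok [] acc).isEmpty,
              !(([] : List Char).isEmpty)) c
            = (emitB (pushedTok [c] acc), (pushedTok [c] acc).isEmpty,
              !(([c] : List Char).isEmpty)) := by
          cases acc with
          | nil =>
            simp [bStep, hs, pushedTok, emitB_cons, escTok, sepB, emitB]
            exact escChar_if c
          | cons a l =>
            simp [bStep, hs, pushedTok, emitB_cons, escTok, sepB]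
            rw [← escChar_if c]
            by_cases h : c ∈ specialsB <;> simp [h, List.append_assoc]
        rw [hstate]
        have hgo : PySem.Chars.split₀.go (c :: rest) [] acc
            = PySem.Chars.split₀.go rest [c] acc := by
          simp [PySem.Chars.split₀.go, hs]
        rw [hgo]
        exact ih [c] acc
      · -- cur ≠ [], in_token = true
        obtain ⟨a, l, rfl⟩ := List.exists_cons_of_ne_nil
          (by simpa [List.isEmpty_eq_false_iff] using hc : cur ≠ [])
        have hstate : bStep (emitB (pushedTok (a :: l) acc), (pushedTok (a :: l) acc).isEmpty,
              !((a :: l : List Char).isEmpty)) c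
            = (emitB (pushedTok (c :: a :: l) acc), (pushedTok (c :: a :: l) acc).isEmpty,
              !((c :: a :: l : List Char).isEmpty)) := by
          simp only [bStep, hs, pushedTok, List.isEmpty_cons, Bool.false_eq_true, if_false,
            Bool.not_false, Bool.not_true]
          rw [esc_append, List.reverse_cons, emitB_cons, emitB_cons]
          simp [escTok, List.flatMap_append, List.append_assoc]
        rw [hstate]
        have hgo : PySem.Chars.split₀.go (c :: rest) (a :: l) acc
            = PySem.Chars.split₀.go rest (c :: a :: l) acc := by
          simp [PySem.Chars.split₀.go, hs]
        rw [hgo]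
        exact ih (c :: a :: l) acc

theorem bfold_eq (s : List Char) :
    (s.foldl bStep ([], true, false)).1
      = PySem.Chars.join sepB ((PySem.Chars.split₀ s).map escTok) := by
  have := bfold_go s [] []
  simpa [pushedTok, emitB, PySem.Chars.split₀] using this

-- ===== VERDICT (by name: the statement is the Claim_ definition above) =====
theorem linkCreator_spec : Claim_equal_linkCreator := by
  intro links _hdom hpre
  unfold Spec_linkCreator linkCreator linkCreator_alt
  simp only [stringCheck_eq]
  obtain ⟨c, hc, hns⟩ := List.any_eq_true.mp hpre
  have hns : PySem.Chars.isspace c = false := by simpa using hns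
  have hmem : '\\' ∈ escChar c ∨ (c ∈ escChar c ∧ PySem.Chars.isspace c = false) := by
    unfold escChar
    by_cases hq : c = '\'' <;> by_cases hm : c ∈ spChars <;> simp [hq, hm, hns]
  have hnw : ∃ d ∈ links.toList.flatMap escChar, PySem.Chars.isspace d = false := by
    rcases hmem with h | ⟨h, hn⟩
    · exact ⟨'\\', List.mem_flatMap.mpr ⟨c, hc, h⟩, by decide⟩
    · exact ⟨c, List.mem_flatMap.mpr ⟨c, hc, h⟩, hn⟩
  obtain ⟨d, hdm, hdn⟩ := hnw
  have hne := split₀_ne_nil _ d hdm hdn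
  rw [manual_join_int ['\\', ' '] _ hne, bfold_eq, split₀_flatMap]
  rfl
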